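-- pv_equiv track=rewrite | github.com/Desarrollo-Telar/Sistema-de-Financiamiento-ElTelar | Backend/project/scripts/cargar_fiadores/vincular.py | limpiar_fiadores
-- ===== SOURCE A (Python) =====
-- def limpiar_fiadores(clientes, fiadores):
--     clientes_vistos = set()
--     fiadores_actualizados = []
--
--     for idx, cliente in enumerate(clientes):
--         if cliente in clientes_vistos:
--             # Cliente repetido: eliminamos el fiador en esa posición
--             fiadores_actualizados.append(None)
--         else:
--             clientes_vistos.add(cliente)
--             fiadores_actualizados.append(fiadores[idx])
--
--     return fiadores_actualizados
-- ===== SOURCE B (Python) =====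
-- def limpiar_fiadores(clientes, fiadores):
--     # Pass 1: table of each client's earliest index.
--     first_index = {}
--     for idx, cliente in enumerate(clientes):
--         if cliente not in first_index:
--             first_index[cliente] = idx
--     # Pass 2: keep the fiador only at the first occurrence of its client.
--     fiadores_actualizados = []
--     for idx, cliente in enumerate(clientes):
--         fiadores_actualizados.append(fiadores[idx] if first_index[cliente] == idx else None)
--     return fiadores_actualizados
-- ===== Notes on version B (the rewrite author's own statement) =====
-- stated objective: alternative
-- what changed: Replaces the single seen-set loop by two passes: first build a dict mapping each client to its earliest index, then emit fiadores[idx] exactly where that table says idx is the first occurrence.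
import Mathlib
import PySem

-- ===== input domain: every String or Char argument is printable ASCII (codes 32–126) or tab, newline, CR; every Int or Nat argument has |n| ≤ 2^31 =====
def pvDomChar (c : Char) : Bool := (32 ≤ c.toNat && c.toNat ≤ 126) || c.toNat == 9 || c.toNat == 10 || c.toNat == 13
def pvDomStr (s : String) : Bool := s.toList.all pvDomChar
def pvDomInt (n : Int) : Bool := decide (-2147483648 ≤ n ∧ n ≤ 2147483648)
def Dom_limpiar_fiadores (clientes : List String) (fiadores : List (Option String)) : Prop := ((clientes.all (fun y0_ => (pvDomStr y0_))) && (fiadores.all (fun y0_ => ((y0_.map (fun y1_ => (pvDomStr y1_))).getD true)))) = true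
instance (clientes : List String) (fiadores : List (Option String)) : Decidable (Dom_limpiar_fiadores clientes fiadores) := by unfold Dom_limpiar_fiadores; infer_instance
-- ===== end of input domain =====

-- B replaces A's single seen-set loop by two passes (a first-index table, then a compare-and-emit pass); alternative decomposition, same cost.


-- ===== PORT A =====
-- fiadores[idx] is ported as (pyGet? …).getD none; the out-of-range case (Python IndexError) is excluded by Pre_.
def laStep (fiadores : List (Option String)) (st : PySem.Set String × List (Option String)) (p : Int × String) : PySem.Set String × List (Option String) :=
  if PySem.Set.contains st.1 p.2 then (st.1, st.2 ++ [none])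
  else (PySem.Set.add st.1 p.2, st.2 ++ [(PySem.List.pyGet? fiadores p.1).getD none])

def limpiar_fiadores (clientes : List String) (fiadores : List (Option String)) : List (Option String) :=
  ((PySem.List.enumerate clientes 0).foldl (laStep fiadores) (PySem.Set.empty, [])).2

-- ===== PORT B =====
-- Pass 1: dict mapping each client to its earliest index.
def lbStep (d : PySem.Dict String Int) (p : Int × String) : PySem.Dict String Int :=
  if d.contains p.2 then d else d.insert p.2 p.1

def lbTable (clientes : List String) : PySem.Dict String Int :=
  (PySem.List.enumerate clientes 0).foldl lbStep PySem.Dict.empty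

-- Pass 2: emit fiadores[idx] exactly at first occurrences (same pyGet?/getD convention as port A).
def limpiar_fiadores_alt (clientes : List String) (fiadores : List (Option String)) : List (Option String) :=
  let fi := lbTable clientes
  (PySem.List.enumerate clientes 0).foldl
    (fun acc p => acc ++ [if fi.getD p.2 (-1) == p.1 then (PySem.List.pyGet? fiadores p.1).getD none else none]) []

-- ===== PRECONDITION & SPEC =====
-- Pre_ excludes exactly the inputs where Python A raises IndexError: a first occurrence of a
-- client at an index ≥ len(fiadores). (Python B raises there too.)
def Pre_limpiar_fiadores (clientes : List String) (fiadores : List (Option String)) : Prop :=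
  ∀ (i : Nat) (h : i < clientes.length), clientes[i] ∉ clientes.take i → i < fiadores.length

instance (clientes : List String) (fiadores : List (Option String)) : Decidable (Pre_limpiar_fiadores clientes fiadores) := by unfold Pre_limpiar_fiadores; infer_instance

def pvWitness_limpiar_fiadores : List String × List (Option String) :=
  (["a", "b", "a"], [some "x", none])

def Spec_limpiar_fiadores (clientes : List String) (fiadores : List (Option String)) (out : List (Option String)) : Prop := out = limpiar_fiadores_alt clientes fiadores
instance (clientes : List String) (fiadores : List (Option String)) (out : List (Option String)) : Decidable (Spec_limpiar_fiadores clientes fiadores out) := by unfold Spec_limpiar_fiadores; infer_instance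

-- ===== CLAIM (what is proved, stated in full; the proofs are below) =====
def Claim_equal_limpiar_fiadores : Prop := ∀ (clientes : List String) (fiadores : List (Option String)), Dom_limpiar_fiadores clientes fiadores → Pre_limpiar_fiadores clientes fiadores → Spec_limpiar_fiadores clientes fiadores (limpiar_fiadores clientes fiadores)

-- ===== LEMMAS AND PROOFS =====

-- first index of c in a list (proof-side reference for lbTable)
def firstIdx? (c : String) : List String → Option Nat
  | [] => none
  | x :: xs => if x == c then some 0 else (firstIdx? c xs).map (· + 1)

-- the table lookup is the first index (offset by the enumeration start)
lemma lbTable_go (c : String) (xs : List String) : ∀ (s : Int) (d : PySem.Dict String Int),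
    ((PySem.List.enumerate xs s).foldl lbStep d).get? c =
      if d.contains c then d.get? c else (firstIdx? c xs).map (fun k => s + k) := by
  induction xs with
  | nil =>
    intro s d
    rw [PySem.List.enumerate_nil]
    simp only [List.foldl_nil, firstIdx?]
    by_cases hc : d.contains c = true
    · rw [if_pos hc]
    · rw [if_neg (by simp [hc])]
      rw [PySem.Dict.contains_eq_isSome_get?] at hc
      cases hg : d.get? c with
      | none => rfl
      | some v => rw [hg] at hc; simp at hc
  | cons x xs ih =>
    intro s d
    rw [PySem.List.enumerate_cons, List.foldl_cons]
    by_cases hxx : d.contains x = true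
    · rw [show lbStep d (s, x) = d by simp [lbStep, hxx], ih]
      by_cases hc : d.contains c = true
      · simp [hc]
      · rw [if_neg (by simp [hc]), if_neg (by simp [hc])]
        have hxc : ¬ x = c := fun h => hc (h ▸ hxx)
        rw [firstIdx?, if_neg (by simp [hxc])]
        cases firstIdx? c xs <;> · simp; try (push_cast; ring)
    · rw [show lbStep d (s, x) = d.insert x s by simp [lbStep, hxx], ih]
      by_cases hxc : x = c
      · subst hxc
        have hc : d.contains x = false := by simpa using hxx
        rw [if_pos (by simp [PySem.Dict.contains_insert_self]), PySem.Dict.get?_insert_self,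
          if_neg (by simp [hc]), firstIdx?]
        simp
      · by_cases hc : d.contains c = true
        · rw [if_pos (by simp [PySem.Dict.contains_insert, hc]), if_pos hc,
            PySem.Dict.get?_insert_of_ne d s (fun h => hxc (Eq.symm h))]
        · have h2 : (d.insert x s).contains c = false := by
            simp [PySem.Dict.contains_insert, hc]
            exact fun h => hxc h.symm
          rw [if_neg (by simp [h2]), if_neg (by simp [hc]), firstIdx?, if_neg (by simp [hxc])]
          cases firstIdx? c xs <;> · simp; try (push_cast; ring)

lemma firstIdx?_split (c : String) : ∀ (pre rest : List String),
    ∃ n, firstIdx? c (pre ++ c :: rest) = some n ∧ (n = pre.length ↔ c ∉ pre) := by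
  intro pre
  induction pre with
  | nil => intro rest; exact ⟨0, by simp [firstIdx?], by simp⟩
  | cons p pre ih =>
    intro rest
    by_cases hp : p = c
    · subst hp
      refine ⟨0, by simp [firstIdx?], ?_⟩
      simp
    · obtain ⟨n, h1, hiff⟩ := ih rest
      refine ⟨n + 1, ?_, ?_⟩
      · rw [List.cons_append, firstIdx?, if_neg (by simp [hp]), h1]
        simp
      · simp only [List.length_cons, List.mem_cons]
        constructor
        · intro h
          rintro (h' | h')
          · exact hp h'.symm
          · exact hiff.mp (by omega) h'
        · intro h
          have : c ∉ pre := fun hm => h (Or.inr hm)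
          have := hiff.mpr this
          omega

-- the per-element test of B equals "not seen in the prefix"
lemma cond_eq (pre rest : List String) (c : String) :
    ((lbTable (pre ++ c :: rest)).getD c (-1) == (pre.length : Int)) = !(decide (c ∈ pre)) := by
  obtain ⟨n, h1, hiff⟩ := firstIdx?_split c pre rest
  have hle := lbTable_go c (pre ++ c :: rest) 0 PySem.Dict.empty
  rw [h1] at hle
  rw [PySem.Dict.getD_eq_get?_getD]
  simp only [lbTable]
  rw [hle, if_neg (by simp)]
  simp only [zero_add]
  by_cases hm : c ∈ pre
  · have hne : n ≠ pre.length := fun h => hiff.mp h hm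
    simp only [hm, decide_true, Bool.not_true, beq_eq_false_iff_ne, ne_eq]
    simp
    omega
  · have heq : n = pre.length := hiff.mpr hm
    simp [hm, heq]

-- main invariant: A's fold over the suffix produces B's per-element values
lemma main_inv (fiadores : List (Option String)) (full : List String) :
    ∀ (xs pre : List String) (acc : List (Option String)), full = pre ++ xs →
    ((PySem.List.enumerate xs (pre.length : Int)).foldl (laStep fiadores) (PySem.Set.ofList pre, acc)).2
      = (PySem.List.enumerate xs (pre.length : Int)).foldl
          (fun acc p => acc ++ [if (lbTable full).getD p.2 (-1) == p.1 then (PySem.List.pyGet? fiadores p.1).getD none else none]) acc := by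
  intro xs
  induction xs with
  | nil => intro pre acc _; simp [PySem.List.enumerate_nil]
  | cons c cs ih =>
    intro pre acc hfull
    rw [PySem.List.enumerate_cons]
    simp only [List.foldl_cons]
    have hcond : ((lbTable full).getD c (-1) == ((pre.length : Nat) : Int)) = !(decide (c ∈ pre)) := by
      rw [hfull]; exact cond_eq pre cs c
    have hlen : ((pre.length : Int) + 1) = (((pre ++ [c]).length : Nat) : Int) := by simp
    by_cases hm : c ∈ pre
    · have hstep : laStep fiadores (PySem.Set.ofList pre, acc) ((pre.length : Int), c)
          = (PySem.Set.ofList (pre ++ [c]), acc ++ [none]) := by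
        have h1 : (PySem.Set.ofList pre).contains c = true :=
          (PySem.Set.contains_iff _ _).mpr ((PySem.Set.mem_ofList _ _).mpr hm)
        have h2 : PySem.Set.ofList (pre ++ [c]) = PySem.Set.ofList pre := by
          rw [PySem.Set.ofList_append_singleton,
            PySem.Set.add_of_mem ((PySem.Set.mem_ofList _ _).mpr hm)]
        simp [laStep, h2, hm]
      have hval : (if (lbTable full).getD c (-1) == ((pre.length : Nat) : Int) then
            (PySem.List.pyGet? fiadores ((pre.length : Nat) : Int)).getD none else none) = none := by
        simp [hcond, hm]
      rw [hstep, hval, hlen, ih (pre ++ [c]) (acc ++ [none]) (by simp [hfull])]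
    · have hstep : laStep fiadores (PySem.Set.ofList pre, acc) ((pre.length : Int), c)
          = (PySem.Set.ofList (pre ++ [c]),
             acc ++ [(PySem.List.pyGet? fiadores ((pre.length : Nat) : Int)).getD none]) := by
        rw [PySem.Set.ofList_append_singleton]
        simp [laStep, hm]
      have hval : (if (lbTable full).getD c (-1) == ((pre.length : Nat) : Int) then
            (PySem.List.pyGet? fiadores ((pre.length : Nat) : Int)).getD none else none)
          = (PySem.List.pyGet? fiadores ((pre.length : Nat) : Int)).getD none := by
        simp [hcond, hm]
      rw [hstep, hval, hlen, ih (pre ++ [c]) _ (by simp [hfull])]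

-- ===== VERDICT (by name: the statement is the Claim_ definition above) =====
theorem limpiar_fiadores_spec : Claim_equal_limpiar_fiadores := by
  intro clientes fiadores _ _
  show limpiar_fiadores clientes fiadores = limpiar_fiadores_alt clientes fiadores
  unfold limpiar_fiadores limpiar_fiadores_alt
  have := main_inv fiadores clientes clientes [] [] (by simp)
  simpa using this
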